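-- pv_equiv track=rewrite | github.com/dy-sh/spoty | spoty/utils.py | group_tags_by_pattern
-- ===== SOURCE A (Python) =====
-- tag_allies = [
--     ['YEAR', 'DATE'],
--     ['TRACK', 'TRACKNUMBER'],
--     ['DISK', 'DISKNUMBER']
-- ]
--
-- def get_tag_allies(tag: str, include_source_tag=True):
--     res = []
--     for allies in tag_allies:
--         if tag in allies:
--             res = allies.copy()
--
--     if tag in res:
--         res.remove(tag)
--
--     if include_source_tag:
--         res.append(tag)
--     return res
--
-- def group_tags_by_pattern(tags_list: list, pattern: str, not_found_tag_name="Unknown"):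
--     groups = {}
--
--     for tags in tags_list:
--         group_name = parse_pattern(tags, pattern)
--
--         if not group_name in groups:
--             groups[group_name] = []
--
--         groups[group_name].append(tags)
--
--     return groups
--
-- def parse_pattern(tags: dict, pattern: str):
--     result = ""
--     tag_name = ""
--     building_tag = False
--     for c in pattern:
--         if c == "%":
--             building_tag = not building_tag
--             if not building_tag:
--                 allies = get_tag_allies(tag_name, True)
--                 for a in allies:
--                     if a in tags:
--                         tag = tags[a]
--                         result += str(tag)
--                 tag_name = ""
--         else:
--             if building_tag:
--                 tag_name += c
--                 tag_name = tag_name.upper()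
--             else:
--                 result += c
--
--     return result
-- ===== SOURCE B (Python) =====
-- # B: restructured throughout -- parse_pattern is a recursive descent over the char
-- # list (cut at the next '%' pair, emit literal + tag values, recurse) instead of A's
-- # char-by-char toggle state machine; get_tag_allies reads a precomputed ally map;
-- # grouping is two staged passes (all keys once, then one filtered list per distinct key).
--
-- tag_allies = [
--     ['YEAR', 'DATE'],
--     ['TRACK', 'TRACKNUMBER'],
--     ['DISK', 'DISKNUMBER']
-- ]
--
-- _ALLY_MAP = {t: [x for x in g if x != t] for g in tag_allies for t in g}
--
-- def get_tag_allies(tag: str, include_source_tag=True):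
--     res = list(_ALLY_MAP.get(tag, []))
--     return res + [tag] if include_source_tag else res
--
-- def _split_at_pct(cs):
--     """(chars before the first '%', chars after it), or (cs, None) if no '%'."""
--     for i, c in enumerate(cs):
--         if c == '%':
--             return cs[:i], cs[i + 1:]
--     return cs, None
--
-- def _parse(tags, cs):
--     lit, rest = _split_at_pct(cs)
--     if rest is None:
--         return ''.join(lit)
--     tagseg, rest2 = _split_at_pct(rest)
--     if rest2 is None:
--         return ''.join(lit)                  # unclosed tag segment is dropped
--     tagname = ''.join(tagseg).upper()
--     vals = ''.join(str(tags[a]) for a in get_tag_allies(tagname, True) if a in tags)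
--     return ''.join(lit) + vals + _parse(tags, rest2)
--
-- def parse_pattern(tags: dict, pattern: str):
--     return _parse(tags, list(pattern))
--
-- def group_tags_by_pattern(tags_list: list, pattern: str, not_found_tag_name="Unknown"):
--     keys = [parse_pattern(t, pattern) for t in tags_list]
--     return {k: [t for t, kk in zip(tags_list, keys) if kk == k]
--             for k in dict.fromkeys(keys)}
-- ===== Notes on version B (the rewrite author's own statement) =====
-- stated objective: alternative
-- what changed: Restructures the whole pipeline: parse_pattern becomes a recursive descent that cuts the pattern at each '%'-pair (instead of the char-by-char toggle state machine), get_tag_allies reads a precomputed ally map, and the grouping is done in two staged passes (compute all keys, then build one filtered list per distinct key) instead of one mutable-dict bucketing pass.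
import Mathlib
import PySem

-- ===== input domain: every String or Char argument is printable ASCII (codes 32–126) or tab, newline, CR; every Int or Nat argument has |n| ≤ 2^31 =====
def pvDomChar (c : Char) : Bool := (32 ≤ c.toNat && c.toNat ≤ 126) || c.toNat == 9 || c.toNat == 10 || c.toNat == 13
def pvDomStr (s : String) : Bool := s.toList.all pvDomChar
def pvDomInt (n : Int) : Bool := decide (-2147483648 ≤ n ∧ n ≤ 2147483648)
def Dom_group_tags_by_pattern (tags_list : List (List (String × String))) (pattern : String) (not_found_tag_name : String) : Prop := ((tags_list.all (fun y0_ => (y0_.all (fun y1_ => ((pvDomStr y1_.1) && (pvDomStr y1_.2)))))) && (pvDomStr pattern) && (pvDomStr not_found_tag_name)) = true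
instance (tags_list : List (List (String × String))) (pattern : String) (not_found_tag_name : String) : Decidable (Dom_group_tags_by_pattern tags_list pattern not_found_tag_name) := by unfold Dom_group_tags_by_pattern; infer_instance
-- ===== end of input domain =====

-- B restructures the whole pipeline: parse_pattern is a recursive descent that cuts the
-- pattern at each '%'-pair (instead of A's char-by-char toggle state machine),
-- get_tag_allies reads a precomputed ally map, and the grouping is done in two staged
-- passes (all keys first, then one filtered list per distinct key) instead of one
-- mutable-dict pass.  Equality of RETURN values is proved including dict insertion order.

-- ===== PORT A =====
def tagAllies : List (List String) := [["YEAR", "DATE"], ["TRACK", "TRACKNUMBER"], ["DISK", "DISKNUMBER"]]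

def getTagAllies (tag : String) (include_source_tag : Bool) : List String :=
  let res : List String := tagAllies.foldl (fun res allies => if tag ∈ allies then allies else res) []
  let res := if tag ∈ res then (PySem.List.remove? res tag).getD res else res
  if include_source_tag then res ++ [tag] else res

-- one step of parse_pattern's character loop; state = (result, tag_name, building_tag)
def parseStep (tags : List (String × String)) (st : String × String × Bool) (c : Char) : String × String × Bool :=
  let (result, tag_name, building_tag) := st
  if c = '%' then
    let building_tag := !building_tag
    if building_tag = false then
      let allies := getTagAllies tag_name true
      let result := allies.foldl (fun result a =>
        match (PySem.Dict.mk tags).get? a with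
        | some tag => result ++ tag      -- str(tag) on a str is the identity
        | none => result) result
      (result, "", false)
    else (result, tag_name, building_tag)
  else
    if building_tag then (result, PySem.Str.upper (tag_name ++ c.toString), building_tag)
    else (result ++ c.toString, tag_name, building_tag)

def parsePattern (tags : List (String × String)) (pattern : String) : String :=
  (pattern.toList.foldl (parseStep tags) ("", "", false)).1

def group_tags_by_pattern (tags_list : List (List (String × String))) (pattern : String) (not_found_tag_name : String) : List (String × List (List (String × String))) :=
  (tags_list.foldl (fun groups tags =>
      let group_name := parsePattern tags pattern
      let groups := if groups.contains group_name then groups else groups.insert group_name []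
      groups.modify group_name [] (· ++ [tags]))
    PySem.Dict.empty).items

-- ===== PORT B =====
-- _ALLY_MAP: for every tag of a group, the other members of its group
def allyMap : PySem.Dict String (List String) :=
  PySem.Dict.mk ([["YEAR", "DATE"], ["TRACK", "TRACKNUMBER"], ["DISK", "DISKNUMBER"]].flatMap
    (fun g => g.map (fun t => (t, g.filter (fun x => x ≠ t)))))

def getTagAlliesB (tag : String) (include_source_tag : Bool) : List String :=
  let res := (allyMap.get? tag).getD []
  if include_source_tag then res ++ [tag] else res

-- _split_at_pct: (chars before the first '%', chars after it), or (cs, none) if no '%'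
def splitAtPct (cs : List Char) : List Char × Option (List Char) :=
  match cs with
  | [] => ([], none)
  | c :: rest =>
    if c = '%' then ([], some rest)
    else
      let (lit, r) := splitAtPct rest
      (c :: lit, r)

-- termination fact for parseB (cited by its decreasing_by)
theorem splitAtPct_some_length (cs lit rest : List Char) (h : (splitAtPct cs).2 = some rest) :
    rest.length < cs.length := by
  induction cs generalizing rest with
  | nil => simp [splitAtPct] at h
  | cons c t ih =>
    by_cases hc : c = '%'
    · simp [splitAtPct, hc] at h; subst h; simp
    · simp only [splitAtPct, hc, if_false] at h
      have := ih rest (by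
        rcases hs : splitAtPct t with ⟨l2, r2⟩
        rw [hs] at h; simpa using h)
      simp; omega

-- _parse: recursive descent
def parseB (tags : List (String × String)) (cs : List Char) : List Char :=
  match h1 : splitAtPct cs with
  | (lit, none) => lit
  | (lit, some rest) =>
    match h2 : splitAtPct rest with
    | (_, none) => lit                      -- unclosed tag segment is dropped
    | (tagseg, some rest2) =>
      let tagname := String.ofList (PySem.Chars.upper tagseg)
      let vals := ((getTagAlliesB tagname true).filterMap
          (fun a => (PySem.Dict.mk tags).get? a)).flatMap String.toList
      lit ++ vals ++ parseB tags rest2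
  termination_by cs.length
  decreasing_by
    have ha := splitAtPct_some_length cs lit rest (by rw [h1])
    have hb := splitAtPct_some_length rest tagseg rest2 (by rw [h2])
    omega

def parsePatternB (tags : List (String × String)) (pattern : String) : String :=
  String.ofList (parseB tags pattern.toList)

def group_tags_by_pattern_alt (tags_list : List (List (String × String))) (pattern : String) (not_found_tag_name : String) : List (String × List (List (String × String))) :=
  let keys := tags_list.map (fun t => parsePatternB t pattern)
  let order := PySem.Set.ofList keys          -- dict.fromkeys: distinct keys, first-occurrence order
  order.map (fun k => (k, (tags_list.zip keys).filterMap (fun p => if p.2 == k then some p.1 else none)))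

-- ===== PRECONDITION & SPEC =====
def Spec_group_tags_by_pattern (tags_list : List (List (String × String))) (pattern : String) (not_found_tag_name : String) (out : List (String × List (List (String × String)))) : Prop := out = group_tags_by_pattern_alt tags_list pattern not_found_tag_name
instance (tags_list : List (List (String × String))) (pattern : String) (not_found_tag_name : String) (out : List (String × List (List (String × String)))) : Decidable (Spec_group_tags_by_pattern tags_list pattern not_found_tag_name out) := by unfold Spec_group_tags_by_pattern; infer_instance

-- ===== CLAIM (what is proved, stated in full; the proofs are below) =====
def Claim_equal_group_tags_by_pattern : Prop := ∀ (tags_list : List (List (String × String))) (pattern : String) (not_found_tag_name : String), Dom_group_tags_by_pattern tags_list pattern not_found_tag_name → Spec_group_tags_by_pattern tags_list pattern not_found_tag_name (group_tags_by_pattern tags_list pattern not_found_tag_name)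

-- ===== LEMMAS AND PROOFS =====

-- ---- string scaffolding (String is kernel-opaque; everything goes through toList) ----

theorem str_ext {s t : String} (h : s.toList = t.toList) : s = t := by
  have := congrArg String.ofList h
  simpa [String.ofList_toList] using this

theorem toList_toString (c : Char) : c.toString.toList = [c] :=
  Eq.symm ((fun {l} {s} => String.ofList_eq.mp) rfl)

theorem sof_nil : String.ofList ([] : List Char) = "" := by
  apply str_ext
  simp [String.toList_ofList, String.toList_empty]

theorem sof_append (l m : List Char) : String.ofList (l ++ m) = String.ofList l ++ String.ofList m := by
  apply str_ext
  simp [String.toList_ofList, String.toList_append]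

theorem sof_cons (c : Char) (l : List Char) : String.ofList (c :: l) = c.toString ++ String.ofList l := by
  apply str_ext
  simp [String.toList_ofList, String.toList_append, toList_toString]

theorem str_append_nil (s : String) : s ++ "" = s := by
  apply str_ext
  simp [String.toList_append, String.toList_empty]

theorem str_nil_append (s : String) : "" ++ s = s := by
  apply str_ext
  simp [String.toList_append, String.toList_empty]

theorem sof_toList (s : String) : String.ofList s.toList = s :=
  String.ofList_toList

-- ---- upper ----

theorem upperChar_idem (c : Char) : PySem.Chars.upperChar (PySem.Chars.upperChar c) = PySem.Chars.upperChar c := by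
  unfold PySem.Chars.upperChar PySem.Chars.islower
  by_cases h1 : 'a' ≤ c
  · by_cases h2 : c ≤ 'z'
    · have ha : 97 ≤ c.toNat := h1
      have hb : c.toNat ≤ 122 := h2
      have hv : Nat.isValidChar (c.toNat - 32) := Or.inl (by omega)
      have htn : (Char.ofNat (c.toNat - 32)).toNat = c.toNat - 32 := by
        rw [Char.ofNat, dif_pos hv]
        exact Char.toNat_ofNatAux hv
      have hno : ¬ ('a' ≤ Char.ofNat (c.toNat - 32)) := by
        show ¬ (97 ≤ (Char.ofNat (c.toNat - 32)).toNat)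
        rw [htn]; omega
      simp [h1, h2, hno]
    · simp [h2]
  · simp [h1]

theorem upper_upper_append (t u : String) :
    PySem.Str.upper (PySem.Str.upper t ++ u) = PySem.Str.upper (t ++ u) := by
  apply str_ext
  simp [PySem.Str.toList_upper, String.toList_append, PySem.Chars.upper, List.map_map,
    Function.comp_def, upperChar_idem]

theorem upper_empty : PySem.Str.upper "" = "" := by
  apply str_ext
  simp [PySem.Str.toList_upper, String.toList_empty, PySem.Chars.upper]

theorem upper_fold (cs : List Char) : ∀ t : String,
    cs.foldl (fun s c => PySem.Str.upper (s ++ c.toString)) (PySem.Str.upper t)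
      = PySem.Str.upper (t ++ String.ofList cs) := by
  induction cs with
  | nil => intro t; simp [sof_nil, str_append_nil]
  | cons c cs ih =>
    intro t
    have h1 : PySem.Str.upper (PySem.Str.upper t ++ c.toString) = PySem.Str.upper (t ++ c.toString) :=
      upper_upper_append t c.toString
    calc (c :: cs).foldl (fun s c => PySem.Str.upper (s ++ c.toString)) (PySem.Str.upper t)
        = cs.foldl (fun s c => PySem.Str.upper (s ++ c.toString)) (PySem.Str.upper (t ++ c.toString)) := by
          simp only [List.foldl_cons]
          rw [h1]
      _ = PySem.Str.upper ((t ++ c.toString) ++ String.ofList cs) := ih (t ++ c.toString)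
      _ = PySem.Str.upper (t ++ String.ofList (c :: cs)) := by
          rw [sof_cons, String.append_assoc]

theorem upper_fold_nil (cs : List Char) :
    cs.foldl (fun s c => PySem.Str.upper (s ++ c.toString)) ""
      = String.ofList (PySem.Chars.upper cs) := by
  have h := upper_fold cs ""
  rw [upper_empty, str_nil_append] at h
  rw [h]
  apply str_ext
  simp [PySem.Str.toList_upper, String.toList_ofList]

-- ---- splitAtPct characterization ----

theorem splitAtPct_none (cs lit : List Char) (h : splitAtPct cs = (lit, none)) :
    lit = cs ∧ ∀ c ∈ cs, c ≠ '%' := by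
  induction cs generalizing lit with
  | nil =>
    simp only [splitAtPct, Prod.mk.injEq] at h
    exact ⟨h.1.symm, by simp⟩
  | cons c t ih =>
    by_cases hc : c = '%'
    · simp [splitAtPct, hc] at h
    · rcases hs : splitAtPct t with ⟨l2, r2⟩
      simp only [splitAtPct, hc, if_false, hs, Prod.mk.injEq] at h
      obtain ⟨h1, h2⟩ := h
      subst h2
      obtain ⟨hl, hf⟩ := ih l2 hs
      subst hl
      subst h1
      refine ⟨rfl, ?_⟩
      intro x hx
      rcases List.mem_cons.mp hx with rfl | hx
      · exact hc
      · exact hf x hx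

theorem splitAtPct_some (cs lit rest : List Char) (h : splitAtPct cs = (lit, some rest)) :
    cs = lit ++ '%' :: rest ∧ ∀ c ∈ lit, c ≠ '%' := by
  induction cs generalizing lit rest with
  | nil => simp [splitAtPct] at h
  | cons c t ih =>
    by_cases hc : c = '%'
    · subst hc
      simp [splitAtPct] at h
      obtain ⟨h1, h2⟩ := h
      subst h1
      subst h2
      exact ⟨by simp, by simp⟩
    · rcases hs : splitAtPct t with ⟨l2, r2⟩
      simp only [splitAtPct, hc, if_false, hs, Prod.mk.injEq] at h
      obtain ⟨h1, h2⟩ := h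
      subst h2
      obtain ⟨ht, hf⟩ := ih l2 rest hs
      subst h1
      refine ⟨by simp [ht], ?_⟩
      intro x hx
      rcases List.mem_cons.mp hx with rfl | hx
      · exact hc
      · exact hf x hx

-- unfolding equations for parseB
theorem parseB_none (tags : List (String × String)) (cs lit : List Char)
    (h : splitAtPct cs = (lit, none)) : parseB tags cs = lit := by
  rw [parseB]
  split
  · next l' heq =>
    rw [h] at heq
    simp only [Prod.mk.injEq, and_true] at heq
    exact heq.symm
  · next l' r' heq =>
    rw [h] at heq
    simp at heq

theorem parseB_unclosed (tags : List (String × String)) (cs lit rest tagseg : List Char)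
    (h1 : splitAtPct cs = (lit, some rest)) (h2 : splitAtPct rest = (tagseg, none)) :
    parseB tags cs = lit := by
  rw [parseB]
  split
  · next l' heq =>
    rw [h1] at heq
    simp at heq
  · next l' r' heq =>
    rw [h1] at heq
    simp only [Prod.mk.injEq, Option.some.injEq] at heq
    obtain ⟨e1, e2⟩ := heq
    subst e1
    subst e2
    split
    · next t' heq2 => rfl
    · next t' r2' heq2 =>
      rw [h2] at heq2
      simp at heq2

theorem parseB_closed (tags : List (String × String)) (cs lit rest tagseg rest2 : List Char)
    (h1 : splitAtPct cs = (lit, some rest)) (h2 : splitAtPct rest = (tagseg, some rest2)) :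
    parseB tags cs = lit ++ (((getTagAlliesB (String.ofList (PySem.Chars.upper tagseg)) true).filterMap
        (fun a => (PySem.Dict.mk tags).get? a)).flatMap String.toList) ++ parseB tags rest2 := by
  rw [parseB]
  split
  · next l' heq =>
    rw [h1] at heq
    simp at heq
  · next l' r' heq =>
    rw [h1] at heq
    simp only [Prod.mk.injEq, Option.some.injEq] at heq
    obtain ⟨e1, e2⟩ := heq
    subst e1
    subst e2
    split
    · next t' heq2 =>
      rw [h2] at heq2
      simp at heq2
    · next t' r2' heq2 =>
      rw [h2] at heq2
      simp only [Prod.mk.injEq, Option.some.injEq] at heq2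
      obtain ⟨f1, f2⟩ := heq2
      subst f1
      subst f2
      rfl

-- ---- A's loop, piecewise ----

theorem lit_scan (tags : List (String × String)) (cs : List Char) (h : ∀ c ∈ cs, c ≠ '%') :
    ∀ (r t : String), cs.foldl (parseStep tags) (r, t, false) = (r ++ String.ofList cs, t, false) := by
  induction cs with
  | nil => intro r t; simp [sof_nil, str_append_nil]
  | cons c cs ih =>
    intro r t
    have hc : c ≠ '%' := h c (by simp)
    have hrec := ih (fun x hx => h x (by simp [hx])) (r ++ c.toString) t
    simp only [List.foldl_cons, parseStep, hc, if_false, if_neg hc, Bool.false_eq_true, if_false] at *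
    rw [hrec, sof_cons, String.append_assoc]

theorem tag_scan (tags : List (String × String)) (cs : List Char) (h : ∀ c ∈ cs, c ≠ '%') :
    ∀ (r t : String), cs.foldl (parseStep tags) (r, t, true)
      = (r, cs.foldl (fun s c => PySem.Str.upper (s ++ c.toString)) t, true) := by
  induction cs with
  | nil => intro r t; rfl
  | cons c cs ih =>
    intro r t
    have hc : c ≠ '%' := h c (by simp)
    have hrec := ih (fun x hx => h x (by simp [hx])) r (PySem.Str.upper (t ++ c.toString))
    simp only [List.foldl_cons, parseStep, hc, if_false, if_neg hc, if_true] at *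
    rw [hrec]

theorem collect_fold (tags : List (String × String)) (allies : List String) :
    ∀ r : String, allies.foldl (fun result a =>
        match (PySem.Dict.mk tags).get? a with
        | some tag => result ++ tag
        | none => result) r
      = r ++ String.ofList ((allies.filterMap (fun a => (PySem.Dict.mk tags).get? a)).flatMap String.toList) := by
  induction allies with
  | nil => intro r; simp [sof_nil, str_append_nil]
  | cons a allies ih =>
    intro r
    rcases hg : (PySem.Dict.mk tags).get? a with _ | v
    · simp only [List.foldl_cons, hg]
      rw [ih r]
      simp [List.filterMap_cons, hg]
    · simp only [List.foldl_cons, hg]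
      rw [ih (r ++ v)]
      simp [List.filterMap_cons, hg, sof_append, sof_toList, String.append_assoc]

theorem allies_eq (t : String) : getTagAllies t true = getTagAlliesB t true := by
  by_cases h1 : t = "YEAR"
  · subst h1; rfl
  by_cases h2 : t = "DATE"
  · subst h2; rfl
  by_cases h3 : t = "TRACK"
  · subst h3; rfl
  by_cases h4 : t = "TRACKNUMBER"
  · subst h4; rfl
  by_cases h5 : t = "DISK"
  · subst h5; rfl
  by_cases h6 : t = "DISKNUMBER"
  · subst h6; rfl
  have n1 : ¬ ("YEAR" = t) := fun e => h1 e.symm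
  have n2 : ¬ ("DATE" = t) := fun e => h2 e.symm
  have n3 : ¬ ("TRACK" = t) := fun e => h3 e.symm
  have n4 : ¬ ("TRACKNUMBER" = t) := fun e => h4 e.symm
  have n5 : ¬ ("DISK" = t) := fun e => h5 e.symm
  have n6 : ¬ ("DISKNUMBER" = t) := fun e => h6 e.symm
  have b1 : ("YEAR" == t) = false := beq_eq_false_iff_ne.mpr n1
  have b2 : ("DATE" == t) = false := beq_eq_false_iff_ne.mpr n2
  have b3 : ("TRACK" == t) = false := beq_eq_false_iff_ne.mpr n3
  have b4 : ("TRACKNUMBER" == t) = false := beq_eq_false_iff_ne.mpr n4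
  have b5 : ("DISK" == t) = false := beq_eq_false_iff_ne.mpr n5
  have b6 : ("DISKNUMBER" == t) = false := beq_eq_false_iff_ne.mpr n6
  simp [getTagAllies, tagAllies, getTagAlliesB, allyMap, PySem.Dict.get?, List.find?,
    h1, h2, h3, h4, h5, h6, b1, b2, b3, b4, b5, b6]

-- ---- the parse equivalence ----

theorem pct_open (tags : List (String × String)) (R : String) :
    parseStep tags (R, "", false) '%' = (R, "", true) := by
  simp [parseStep]

theorem pct_close (tags : List (String × String)) (R T : String) :
    parseStep tags (R, T, true) '%'
      = (R ++ String.ofList (((getTagAllies T true).filterMap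
          (fun a => (PySem.Dict.mk tags).get? a)).flatMap String.toList), "", false) := by
  simp [parseStep, collect_fold]

theorem foldl_parse (tags : List (String × String)) :
    ∀ (n : Nat) (cs : List Char), cs.length = n → ∀ r : String,
      (cs.foldl (parseStep tags) (r, "", false)).1 = r ++ String.ofList (parseB tags cs) := by
  intro n
  induction n using Nat.strong_induction_on with
  | _ n ih =>
    intro cs hn r
    rcases h1 : splitAtPct cs with ⟨lit, rest?⟩
    rcases rest? with _ | rest
    · obtain ⟨hl, hfree⟩ := splitAtPct_none cs lit h1
      subst hl
      rw [parseB_none tags lit lit h1, lit_scan tags lit hfree]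
    · obtain ⟨hcs, hfree⟩ := splitAtPct_some cs lit rest h1
      rcases h2 : splitAtPct rest with ⟨tagseg, rest2?⟩
      rcases rest2? with _ | rest2
      · obtain ⟨hl2, hfree2⟩ := splitAtPct_none rest tagseg h2
        subst hl2
        rw [parseB_unclosed tags cs lit tagseg tagseg h1 h2, hcs,
          List.foldl_append, lit_scan tags lit hfree]
        simp only [List.foldl_cons]
        rw [pct_open, tag_scan tags tagseg hfree2]
      · obtain ⟨hrest, hfree2⟩ := splitAtPct_some rest tagseg rest2 h2
        have hlen : rest2.length < n := by
          rw [hcs, hrest] at hn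
          simp at hn
          omega
        rw [parseB_closed tags cs lit rest tagseg rest2 h1 h2, hcs, hrest,
          List.foldl_append, lit_scan tags lit hfree]
        simp only [List.foldl_cons]
        rw [pct_open, List.foldl_append, tag_scan tags tagseg hfree2]
        simp only [List.foldl_cons]
        rw [pct_close, upper_fold_nil, allies_eq]
        rw [ih rest2.length hlen rest2 rfl]
        simp [sof_append, String.append_assoc]

theorem parsePatternB_eq (tags : List (String × String)) (pattern : String) :
    parsePatternB tags pattern = parsePattern tags pattern := by
  unfold parsePatternB parsePattern
  rw [foldl_parse tags pattern.toList.length pattern.toList rfl ""]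
  rw [str_nil_append]

-- ---- the grouping equivalence ----

-- A's "if key absent: d[k] = []" then "d[k].append(t)" is a single modify.
theorem step_eq_modify {ν : Type} (d : PySem.Dict String ν) (k : String) (d0 : ν) (f : ν → ν) :
    (if d.contains k then d else d.insert k d0).modify k d0 f = d.modify k d0 f := by
  by_cases h : d.contains k
  · simp [h]
  · simp only [h, Bool.false_eq_true, if_false]
    have hg : d.getD k d0 = d0 := PySem.Dict.getD_of_not_contains d d0 (by simpa using h)
    simp [PySem.Dict.modify, PySem.Dict.getD_insert_self, PySem.Dict.insert_insert_self, hg]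

theorem filterMap_if {α : Type} (p : α → Bool) (l : List α) :
    l.filterMap (fun x => if p x then some x else none) = l.filter p := by
  induction l with
  | nil => rfl
  | cons a t ih => by_cases h : p a <;> simp [h, ih]

theorem zip_self_map {α β : Type} (f : α → β) (l : List α) :
    l.zip (l.map f) = l.map (fun x => (x, f x)) := by
  induction l with
  | nil => rfl
  | cons a t ih => simp [ih]

-- ===== VERDICT (by name: the statement is the Claim_ definition above) =====
theorem group_tags_by_pattern_spec : Claim_equal_group_tags_by_pattern := by
  intro tags_list pattern nf _
  unfold Spec_group_tags_by_pattern group_tags_by_pattern group_tags_by_pattern_alt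
  simp only [parsePatternB_eq]
  simp only [step_eq_modify]
  have hfold : tags_list.foldl
      (fun groups tags => groups.modify (parsePattern tags pattern) [] (· ++ [tags]))
      PySem.Dict.empty
      = (tags_list.map (fun t => (parsePattern t pattern, t))).foldl
          (fun d p => d.modify p.1 [] (· ++ [p.2])) PySem.Dict.empty := by
    simp [List.foldl_map]
  rw [hfold]
  have hkeys : ((tags_list.map (fun t => (parsePattern t pattern, t))).foldl
      (fun d p => d.modify p.1 [] (· ++ [p.2])) PySem.Dict.empty).keys
      = PySem.Set.ofList (tags_list.map (fun t => parsePattern t pattern)) := by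
    rw [PySem.Dict.keys_foldl_modify_key _ Prod.fst [] (fun _ p v => v ++ [p.2])]
    simp [PySem.Dict.keys_empty, PySem.Set.update_nil_left, List.map_map, Function.comp_def]
  have hnodup : ((tags_list.map (fun t => (parsePattern t pattern, t))).foldl
      (fun d p => d.modify p.1 [] (· ++ [p.2])) PySem.Dict.empty).keys.Nodup := by
    exact PySem.Dict.nodup_keys_foldl_modify_key _ Prod.fst [] (fun _ p v => v ++ [p.2]) _
      (by simp [PySem.Dict.keys_empty])
  rw [PySem.Dict.items_eq_map_keys _ hnodup [], hkeys]
  apply List.map_congr_left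
  intro k _
  rw [PySem.Dict.getD_foldl_modify_append]
  simp only [PySem.Dict.getD_empty, List.nil_append, zip_self_map, List.filterMap_map,
    List.filter_map, Function.comp_def, filterMap_if]
  simp [Function.comp_def]
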